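-- pv_equiv track=rewrite | github.com/thisIsJooS/Problem-Solving-Hub | data-structure/codes.py | permutations_with_replacement
-- ===== SOURCE A (Python) =====
-- def permutations_with_replacement(arr, r):
--     result = []
--
--     # 기본 케이스 : 중복 순열의 길이가 0일 때 빈 배열을 반환
--     if r == 0:
--         return [[]]
--
--     # 재귀적으로 각 숫자를 고정시키고 나머지 숫자들의 중복 순열을 구함
--     for i in range(len(arr)):
--         current = arr[i]
--
--         # 길이가 r-1 인 중복 순열을 구함 (같은 숫자를 다시 사용할 수 있음)
--         for perm in permutations_with_replacement(arr, r-1):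
--             result.append([current] + perm)
--
--     return result
-- ===== SOURCE B (Python) =====
-- def permutations_with_replacement(arr, r):
--     # Iterative bottom-up build: each level extends the previous level's list once,
--     # instead of A's recursion recomputing the (r-1)-level result per element of arr.
--     result = [[]]
--     for _ in range(r):
--         result = [[x] + p for x in arr for p in result]
--     return result
-- ===== Notes on version B (the rewrite author's own statement) =====
-- stated objective: simpler
-- what changed: Iterative bottom-up build: one loop extends the previous level's list once per level, instead of A's recursion that recomputes the (r-1)-level result for every element of arr.
-- outside the precondition, e.g. on permutations_with_replacement([], -1): A returns [], B returns [[]]; on permutations_with_replacement([1], -1): A does not finish within the time limit, B returns [[]]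
import Mathlib
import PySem

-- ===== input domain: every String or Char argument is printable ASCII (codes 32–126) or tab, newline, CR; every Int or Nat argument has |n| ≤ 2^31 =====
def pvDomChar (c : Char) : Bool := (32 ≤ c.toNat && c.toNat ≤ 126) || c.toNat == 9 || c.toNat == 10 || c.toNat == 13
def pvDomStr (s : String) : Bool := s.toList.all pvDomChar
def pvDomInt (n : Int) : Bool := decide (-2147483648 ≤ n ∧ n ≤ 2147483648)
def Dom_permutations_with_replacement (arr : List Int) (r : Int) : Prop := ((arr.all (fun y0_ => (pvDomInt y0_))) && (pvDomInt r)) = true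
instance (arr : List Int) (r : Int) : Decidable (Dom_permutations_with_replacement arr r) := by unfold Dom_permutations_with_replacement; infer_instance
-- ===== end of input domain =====

-- B replaces A's recursion (which recomputes the (r-1)-level result once per element of arr)
-- by an iterative bottom-up loop computing each level exactly once (objective: simpler).

-- ===== PORT A =====
-- Port of A's recursion. For r < 0 and nonempty arr the Python A diverges
-- (RecursionError, outside Pre_); the `r < 0` guard only makes the port total there.
def permutations_with_replacement (arr : List Int) (r : Int) : List (List Int) :=
  if r = 0 then [[]]
  else if r < 0 then []
  else
    -- for i in range(len(arr)): current = arr[i]; for perm in rec(arr, r-1): result.append([current] + perm)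
    arr.foldl (fun result current =>
      result ++ (permutations_with_replacement arr (r - 1)).map (fun perm => current :: perm)) []
termination_by r.toNat
decreasing_by omega

-- ===== PORT B =====
def permutations_with_replacement_alt (arr : List Int) (r : Int) : List (List Int) :=
  -- result = [[]]; for _ in range(r): result = [[x] + p for x in arr for p in result]
  (PySem.List.pyRange 0 r 1).foldl
    (fun result _ => arr.flatMap (fun x => result.map (fun p => x :: p))) [[]]

-- ===== PRECONDITION & SPEC =====
-- Pre_ excludes negative r (outside the function's natural domain): there A raises
-- RecursionError on nonempty arr, and on empty arr returns the accidental [] where B returns [[]].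
def Pre_permutations_with_replacement (arr : List Int) (r : Int) : Prop := 0 ≤ r
instance (arr : List Int) (r : Int) : Decidable (Pre_permutations_with_replacement arr r) := by unfold Pre_permutations_with_replacement; infer_instance
def pvWitness_permutations_with_replacement : List Int × Int := ([1, 2], 2)

def Spec_permutations_with_replacement (arr : List Int) (r : Int) (out : List (List Int)) : Prop := out = permutations_with_replacement_alt arr r
instance (arr : List Int) (r : Int) (out : List (List Int)) : Decidable (Spec_permutations_with_replacement arr r out) := by unfold Spec_permutations_with_replacement; infer_instance

-- ===== CLAIM (what is proved, stated in full; the proofs are below) =====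
def Claim_equal_permutations_with_replacement : Prop := ∀ (arr : List Int) (r : Int), Dom_permutations_with_replacement arr r → Pre_permutations_with_replacement arr r → Spec_permutations_with_replacement arr r (permutations_with_replacement arr r)

-- ===== LEMMAS AND PROOFS =====
lemma pwr_eq_nat (n : Nat) (arr : List Int) :
    permutations_with_replacement arr (n : Int) = permutations_with_replacement_alt arr (n : Int) := by
  induction n with
  | zero =>
      simp [permutations_with_replacement, permutations_with_replacement_alt,
            PySem.List.pyRange_one_eq_nil]
  | succ n ih =>
      have hA : permutations_with_replacement arr ((n + 1 : Nat) : Int)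
          = arr.flatMap (fun c => (permutations_with_replacement arr (n : Int)).map (fun p => c :: p)) := by
        rw [permutations_with_replacement]
        have h0 : ¬ ((n + 1 : Nat) : Int) = 0 := by omega
        have h1 : ¬ ((n + 1 : Nat) : Int) < 0 := by omega
        have h2 : ((n + 1 : Nat) : Int) - 1 = (n : Int) := by omega
        simp only [h0, h1, h2, if_false]
        rw [PySem.List.foldl_append_eq_flatMap]
        simp
      have hB : permutations_with_replacement_alt arr ((n + 1 : Nat) : Int)
          = arr.flatMap (fun c => (permutations_with_replacement_alt arr (n : Int)).map (fun p => c :: p)) := by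
        unfold permutations_with_replacement_alt
        have h : ((n + 1 : Nat) : Int) = (n : Int) + 1 := by omega
        rw [h, PySem.List.pyRange_one_succ_right (by omega : (0:Int) ≤ (n : Int)),
            List.foldl_append]
        simp
      rw [hA, hB, ih]

-- ===== VERDICT (by name: the statement is the Claim_ definition above) =====
theorem permutations_with_replacement_spec : Claim_equal_permutations_with_replacement := by
  intro arr r _ hpre
  unfold Pre_permutations_with_replacement at hpre
  unfold Spec_permutations_with_replacement
  obtain ⟨n, rfl⟩ : ∃ n : Nat, r = (n : Int) := ⟨r.toNat, by omega⟩
  exact pwr_eq_nat n arr
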